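-- pv_equiv track=rewrite | github.com/MattiMatt8/Reiknirit_v4 | skilaverkefni4.py | binaryLeit
-- ===== SOURCE A (Python) =====
-- def binaryLeit(listi,finna):
--     midja = len(listi)//2
--     if midja == 0:
--         if listi[midja] == finna:
--             return midja
--         return -1
--     if listi[midja] == finna:
--         return midja
--     for x in range(midja):
--         if listi[x] == finna:
--             return x
--     re = binaryLeit(listi[midja+1:len(listi)],finna)
--     if re == -1:
--         return -1
--     else:
--         return re + midja + 1
-- ===== SOURCE B (Python) =====
-- def binaryLeit(listi, finna):
--     # Iterative rewrite: one loop with a moving lower bound on the original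
--     # list (no slicing, no recursion, no index-offset reconstruction);
--     # returns -1 instead of raising on an exhausted segment / empty list.
--     n = len(listi)
--     lo = 0
--     while True:
--         m = (n - lo) // 2
--         mid = lo + m
--         if m == 0:
--             return mid if mid < n and listi[mid] == finna else -1
--         if listi[mid] == finna:
--             return mid
--         for x in range(lo, mid):
--             if listi[x] == finna:
--                 return x
--         lo = mid + 1
-- ===== Notes on version B (the rewrite author's own statement) =====
-- stated objective: simpler
-- what changed: Replaces A's recursion on list slices (with -1/offset reconstruction of the return value) by a single iterative loop over the original list with a moving lower bound, returning absolute indices directly; Pre_ excludes the inputs where A raises IndexError (finna absent and the halving segment-length chain hitting 0 or 2).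
import Mathlib
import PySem

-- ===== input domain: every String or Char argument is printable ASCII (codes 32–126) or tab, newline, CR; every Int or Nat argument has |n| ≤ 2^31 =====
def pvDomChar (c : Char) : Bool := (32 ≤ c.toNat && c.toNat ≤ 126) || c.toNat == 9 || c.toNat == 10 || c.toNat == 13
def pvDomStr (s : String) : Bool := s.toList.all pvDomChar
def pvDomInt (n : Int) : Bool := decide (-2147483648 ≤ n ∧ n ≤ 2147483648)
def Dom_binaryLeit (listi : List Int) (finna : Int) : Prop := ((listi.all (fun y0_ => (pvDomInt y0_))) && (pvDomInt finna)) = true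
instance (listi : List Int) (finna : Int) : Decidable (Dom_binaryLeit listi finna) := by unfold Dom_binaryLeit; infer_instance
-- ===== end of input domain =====

-- B replaces A's slice-building recursion by a single iterative loop with a moving lower
-- bound (objective: simpler, no slice copies). On inputs A raises IndexError on (outside
-- Pre_) B's loop instead terminates with -1; those inputs are excluded by Pre_.

-- ===== PORT A =====
-- literal transliteration of A: recursion on the right slice listi[midja+1:len(listi)],
-- prefix scan over range(midja), result re-offset by midja+1
def binaryLeit (listi : List Int) (finna : Int) : Int :=
  let midja := listi.length / 2
  if midja = 0 then
    if PySem.List.pyGet? listi (midja : Int) == some finna then (midja : Int) else -1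
  else if PySem.List.pyGet? listi (midja : Int) == some finna then (midja : Int)
  else
    match (PySem.List.pyRange 0 (midja : Int) 1).find? (fun x => PySem.List.pyGet? listi x == some finna) with
    | some x => x
    | none =>
      let re := binaryLeit (PySem.List.slice listi (some ((midja : Int) + 1)) (some (listi.length : Int))) finna
      if re = -1 then -1 else re + (midja : Int) + 1
termination_by listi.length
decreasing_by
  simp only [PySem.List.length_slice, PySem.List.clampIdx]
  split_ifs <;> omega

-- ===== PORT B =====
-- literal transliteration of B's while-loop: n fixed, lo the moving lower bound
def bLoop (listi : List Int) (finna : Int) (n lo : Nat) : Int :=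
  let m := (n - lo) / 2
  let mid := lo + m
  if m = 0 then
    if decide (mid < n) && (PySem.List.pyGet? listi (mid : Int) == some finna) then (mid : Int) else -1
  else if PySem.List.pyGet? listi (mid : Int) == some finna then (mid : Int)
  else
    match (PySem.List.pyRange (lo : Int) (mid : Int) 1).find? (fun x => PySem.List.pyGet? listi x == some finna) with
    | some x => x
    | none => bLoop listi finna n (mid + 1)
termination_by n - lo
decreasing_by omega

def binaryLeit_alt (listi : List Int) (finna : Int) : Int :=
  bLoop listi finna listi.length 0

-- ===== PRECONDITION & SPEC =====
-- safeLen k: searching a k-element segment for an absent value returns (-1) rather than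
-- raising: k = 1 returns, k = 0 and k = 2 raise, otherwise recurse on the right-slice
-- length (k-1)/2
def safeLen : Nat → Bool
  | 0 => false
  | 1 => true
  | 2 => false
  | (k + 3) => safeLen ((k + 2) / 2)

-- Pre_ admits exactly the inputs on which Python A returns: finna occurs in the list, or
-- the halving chain of right-slice lengths bottoms out at a single element (A raises
-- IndexError on every other input).
def Pre_binaryLeit (listi : List Int) (finna : Int) : Prop :=
  finna ∈ listi ∨ safeLen listi.length = true
instance (listi : List Int) (finna : Int) : Decidable (Pre_binaryLeit listi finna) := by
  unfold Pre_binaryLeit; infer_instance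

def pvWitness_binaryLeit : List Int × Int := ([1, 2, 3], 2)

def Spec_binaryLeit (listi : List Int) (finna : Int) (out : Int) : Prop := out = binaryLeit_alt listi finna
instance (listi : List Int) (finna : Int) (out : Int) : Decidable (Spec_binaryLeit listi finna out) := by unfold Spec_binaryLeit; infer_instance

-- ===== CLAIM (what is proved, stated in full; the proofs are below) =====
def Claim_equal_binaryLeit : Prop := ∀ (listi : List Int) (finna : Int), Dom_binaryLeit listi finna → Pre_binaryLeit listi finna → Spec_binaryLeit listi finna (binaryLeit listi finna)

-- ===== LEMMAS AND PROOFS =====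

-- A returns -1 or a nonnegative index
lemma nonneg_aux : ∀ (k : Nat) (listi : List Int) (finna : Int), listi.length ≤ k →
    binaryLeit listi finna = -1 ∨ 0 ≤ binaryLeit listi finna := by
  intro k
  induction k with
  | zero =>
    intro listi finna h
    rw [binaryLeit]
    simp_all [PySem.List.pyGet?]
  | succ k ih =>
    intro listi finna h
    rw [binaryLeit]
    simp only
    by_cases h1 : listi.length / 2 = 0
    · rw [if_pos h1]; split_ifs <;> simp [h1]
    · rw [if_neg h1]
      by_cases h2 : (PySem.List.pyGet? listi ((listi.length / 2 : Nat) : Int) == some finna) = true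
      · rw [if_pos h2]; right; positivity
      · rw [if_neg h2]
        cases hf : (PySem.List.pyRange 0 ((listi.length / 2 : Nat) : Int) 1).find? (fun x => PySem.List.pyGet? listi x == some finna) with
        | some x =>
          dsimp only
          have hx := List.mem_of_find?_eq_some hf
          rw [PySem.List.mem_pyRange_one] at hx
          right; exact hx.1
        | none =>
          dsimp only
          have hlt : (PySem.List.slice listi (some ((listi.length / 2 : Nat) + 1 : Int)) (some (listi.length : Int))).length ≤ k := by
            simp only [PySem.List.length_slice, PySem.List.clampIdx]
            split_ifs <;> omega
          rcases ih _ finna hlt with hre | hre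
          · rw [if_pos hre]; left; rfl
          · rw [if_neg (by omega)]
            right
            have : (0:Int) ≤ ((listi.length / 2 : Nat) : Int) := by positivity
            omega

-- the main invariant: B's loop at lower bound lo computes A's answer on the segment
-- listi.drop lo, shifted back to an absolute index
lemma bLoop_eq (finna : Int) :
    ∀ (k : Nat) (listi : List Int) (lo : Nat), listi.length - lo ≤ k → lo ≤ listi.length →
    (finna ∈ listi.drop lo ∨ safeLen (listi.length - lo) = true) →
    bLoop listi finna listi.length lo =
      (if binaryLeit (listi.drop lo) finna = -1 then -1
       else binaryLeit (listi.drop lo) finna + (lo : Int)) := by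
  intro k
  induction k with
  | zero =>
    intro listi lo hk hlo hpre
    exfalso
    have h0 : listi.length - lo = 0 := by omega
    have hnil : listi.drop lo = [] := List.drop_eq_nil_of_le (by omega)
    rw [hnil, h0] at hpre
    simp [safeLen] at hpre
  | succ k ih =>
    intro listi lo hk hlo hpre
    have hz : listi.length - lo ≠ 0 := by
      intro h0
      have hnil : listi.drop lo = [] := List.drop_eq_nil_of_le (by omega)
      rw [hnil, h0] at hpre
      simp [safeLen] at hpre
    rw [bLoop, binaryLeit]
    dsimp only
    simp only [List.length_drop]
    by_cases hm : (listi.length - lo) / 2 = 0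
    · -- segment of length exactly 1
      have h1 : listi.length - lo = 1 := by omega
      rw [if_pos hm, if_pos hm]
      have hlt : lo + (listi.length - lo) / 2 < listi.length := by omega
      simp only [PySem.List.pyGet?_natCast, List.getElem?_drop]
      rw [decide_eq_true hlt, Bool.true_and]
      by_cases hv : (listi[lo + (listi.length - lo) / 2]? == some finna) = true
      · rw [if_pos hv, if_pos hv, if_neg (by omega : ¬((((listi.length - lo) / 2 : Nat)) : Int) = -1)]
        push_cast; omega
      · rw [if_neg hv, if_neg hv, if_pos rfl]
    · rw [if_neg hm, if_neg hm]
      have h2le : 2 ≤ listi.length - lo := by omega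
      simp only [PySem.List.pyGet?_natCast, List.getElem?_drop]
      by_cases hv : (listi[lo + (listi.length - lo) / 2]? == some finna) = true
      · rw [if_pos hv, if_pos hv,
          if_neg (by omega : ¬((((listi.length - lo) / 2 : Nat)) : Int) = -1)]
        push_cast; omega
      · rw [if_neg hv, if_neg hv]
        set M := (listi.length - lo) / 2 with hM
        have hA : PySem.List.pyRange 0 (M : Int) 1
            = (List.range M).map (fun j : Nat => ((0 : Int) + (j : Int))) := by
          rw [PySem.List.pyRange_one]; congr 1
        have hB : PySem.List.pyRange (lo : Int) ((lo + M : Nat) : Int) 1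
            = (List.range M).map (fun j : Nat => ((lo : Int) + (j : Int))) := by
          rw [PySem.List.pyRange_one]; congr 1; congr 1; omega
        rw [hA, hB, List.find?_map, List.find?_map]
        have hfun : ((fun x => PySem.List.pyGet? (listi.drop lo) x == some finna) ∘ (fun j : Nat => ((0 : Int) + (j : Int))))
            = ((fun x => PySem.List.pyGet? listi x == some finna) ∘ (fun j : Nat => ((lo : Int) + (j : Int)))) := by
          funext j
          have h0 : ((0 : Int) + (j : Int)) = ((j : Nat) : Int) := by omega
          have hl : ((lo : Int) + (j : Int)) = ((lo + j : Nat) : Int) := by push_cast; ring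
          simp only [Function.comp, h0, hl, PySem.List.pyGet?_natCast, List.getElem?_drop]
        rw [hfun]
        have hpredi : ∀ j : Nat, ((fun x => PySem.List.pyGet? listi x == some finna) ∘ (fun j : Nat => ((lo : Int) + (j : Int)))) j = (listi[lo + j]? == some finna) := by
          intro j
          simp only [Function.comp]
          rw [show ((lo : Int) + (j : Int)) = ((lo + j : Nat) : Int) from by push_cast; ring,
            PySem.List.pyGet?_natCast]
        cases hf : (List.range M).find? ((fun x => PySem.List.pyGet? listi x == some finna) ∘ (fun j : Nat => ((lo : Int) + (j : Int)))) with
        | some x =>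
          simp only [Option.map_some]
          rw [if_neg (by omega : ¬((0 : Int) + (x : Int)) = -1)]
          ring
        | none =>
          simp only [Option.map_none]
          have hslice : PySem.List.slice (listi.drop lo) (some ((M : Int) + 1)) (some ((listi.length - lo : Nat) : Int))
              = listi.drop (lo + M + 1) := by
            rw [show ((M : Int) + 1) = ((M + 1 : Nat) : Int) from by push_cast; ring,
              PySem.List.slice_natCast, List.drop_drop,
              List.take_of_length_le (by simp; omega)]
            congr 1
          rw [hslice]
          have hpre' : finna ∈ listi.drop (lo + M + 1) ∨ safeLen (listi.length - (lo + M + 1)) = true := by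
            rcases hpre with hmem | hsafe
            · left
              obtain ⟨i, hi, hgi⟩ := List.getElem_of_mem hmem
              have hig : listi[lo + i]? = some finna := by
                rw [← List.getElem?_drop, List.getElem?_eq_getElem hi, hgi]
              have hnot := List.find?_eq_none.mp hf
              rcases lt_trichotomy i M with hiM | hiM | hiM
              · have := hnot i (List.mem_range.mpr hiM)
                rw [hpredi i] at this
                simp [hig] at this
              · have hMv : (listi[lo + M]? == some finna) = true := by
                  rw [← hiM, hig]; simp
                exact absurd hMv hv
              · refine List.mem_of_getElem? (i := i - (M + 1)) ?_
                rw [List.getElem?_drop, show (lo + M + 1) + (i - (M + 1)) = lo + i from by omega]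
                exact hig
            · right
              have hne2 : listi.length - lo ≠ 2 := by
                intro h2; rw [h2] at hsafe; simp [safeLen] at hsafe
              obtain ⟨j, hj⟩ : ∃ j, listi.length - lo = j + 3 := ⟨listi.length - lo - 3, by omega⟩
              rw [hj] at hsafe
              rw [safeLen] at hsafe
              rw [show listi.length - (lo + M + 1) = (j + 2) / 2 from by omega]
              exact hsafe
          rw [ih listi (lo + M + 1) (by omega) (by omega) hpre']
          by_cases hre : binaryLeit (listi.drop (lo + M + 1)) finna = -1
          · simp [hre]
          · have hnn : 0 ≤ binaryLeit (listi.drop (lo + M + 1)) finna := by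
              rcases nonneg_aux (listi.drop (lo + M + 1)).length (listi.drop (lo + M + 1)) finna le_rfl with h | h
              · exact absurd h hre
              · exact h
            simp only [if_neg hre]
            rw [if_neg (by omega : ¬(binaryLeit (listi.drop (lo + M + 1)) finna + (M : Int) + 1) = -1)]
            push_cast; ring

-- ===== VERDICT (by name: the statement is the Claim_ definition above) =====
theorem binaryLeit_spec : Claim_equal_binaryLeit := by
  intro listi finna _ hpre
  unfold Spec_binaryLeit binaryLeit_alt
  have h := bLoop_eq finna listi.length listi 0 (by omega) (by omega)
    (by simpa using hpre)
  simp only [List.drop_zero] at h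
  rw [h]
  split <;> omega
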